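-- pv_equiv track=rewrite | github.com/y-ann/aoc2023 | day2/part1.py | ids_of_possible_games
-- ===== SOURCE A (Python) =====
-- def ids_of_possible_games(
--     games: list[list[dict[str, int]]],
--     bag_content: dict[str, int],
-- ) -> list[int]:
--     result = []
--     for i, game in enumerate(games):
--         game_possible = True
--         for tirage in game:
--             for color, count in tirage.items():
--                 if count > bag_content.get(color, 0):
--                     game_possible = False
--         if game_possible:
--             result.append(i + 1)
--     return result
-- ===== SOURCE B (Python) =====
-- def _max_table(game):
--     """Minimal cubes needed per color: the max count seen across the game's draws."""
--     table = {}
--     for tirage in game: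
--         for color, count in tirage.items():
--             if color not in table or count > table[color]:
--                 table[color] = count
--     return table
--
--
-- def ids_of_possible_games(
--     games: list[list[dict[str, int]]],
--     bag_content: dict[str, int],
-- ) -> list[int]:
--     return [i + 1 for i, game in enumerate(games)
--             if all(count <= bag_content.get(color, 0)
--                    for color, count in _max_table(game).items())]
-- ===== Notes on version B (the rewrite author's own statement) =====
-- stated objective: alternative
-- what changed: B replaces A's flag-accumulating nested loop per game by a two-phase decomposition: a helper folds each game's draws into a max-count-per-color table, and a comprehension keeps i+1 for the games whose every table entry fits the bag (A compares every pair, B one entry per distinct color).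
import Mathlib
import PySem

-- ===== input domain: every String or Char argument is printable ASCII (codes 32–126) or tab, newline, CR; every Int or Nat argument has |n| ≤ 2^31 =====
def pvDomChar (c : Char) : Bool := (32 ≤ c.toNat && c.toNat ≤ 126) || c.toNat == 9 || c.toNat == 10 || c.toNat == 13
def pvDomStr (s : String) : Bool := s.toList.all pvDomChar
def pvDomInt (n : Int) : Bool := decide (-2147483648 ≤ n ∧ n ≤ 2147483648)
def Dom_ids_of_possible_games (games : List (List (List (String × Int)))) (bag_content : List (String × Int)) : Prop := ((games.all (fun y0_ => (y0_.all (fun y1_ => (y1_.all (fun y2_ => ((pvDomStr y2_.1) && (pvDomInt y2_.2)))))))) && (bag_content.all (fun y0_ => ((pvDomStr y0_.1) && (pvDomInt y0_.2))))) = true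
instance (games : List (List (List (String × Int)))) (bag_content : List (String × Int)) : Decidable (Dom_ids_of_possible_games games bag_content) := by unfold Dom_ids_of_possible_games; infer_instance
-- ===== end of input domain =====

-- B restructures A's per-pair flag loop into a two-phase pass per game: build a
-- max-count-per-color table from all draws, then compare each table entry to the bag
-- (objective: alternative decomposition, same asymptotic cost).

-- ===== PORT A =====
-- A: flag loop over every (color, count) pair of every draw, then append i+1 if the flag survived.
def ids_of_possible_games (games : List (List (List (String × Int)))) (bag_content : List (String × Int)) : List Int :=
  (PySem.List.enumerate games 0).foldl
    (fun result ig =>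
      let game_possible := ig.2.foldl
        (fun gp tirage => tirage.foldl
          (fun gp2 p => if p.2 > (PySem.Dict.mk bag_content).getD p.1 0 then false else gp2) gp)
        true
      if game_possible then result ++ [ig.1 + 1] else result)
    []

-- ===== PORT B =====
-- needed[color] = max count seen: keep the larger value (Python: `if color not in needed or count > needed[color]`)
def pvStepMax (d : PySem.Dict String Int) (p : String × Int) : PySem.Dict String Int :=
  match d.get? p.1 with
  | none => d.insert p.1 p.2
  | some m => if p.2 > m then d.insert p.1 p.2 else d

def pvMaxTable (game : List (List (String × Int))) : PySem.Dict String Int :=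
  game.foldl (fun d tirage => tirage.foldl pvStepMax d) PySem.Dict.empty

-- `count <= bag_content.get(color, 0)`
def pvOk (bag_content : List (String × Int)) (q : String × Int) : Bool :=
  decide (q.2 ≤ (PySem.Dict.mk bag_content).getD q.1 0)

def ids_of_possible_games_alt (games : List (List (List (String × Int)))) (bag_content : List (String × Int)) : List Int :=
  ((PySem.List.enumerate games 0).filter
      (fun ig => (pvMaxTable ig.2).items.all (pvOk bag_content))).map
    (fun ig => ig.1 + 1)

-- ===== PRECONDITION & SPEC =====
def Spec_ids_of_possible_games (games : List (List (List (String × Int)))) (bag_content : List (String × Int)) (out : List Int) : Prop := out = ids_of_possible_games_alt games bag_content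
instance (games : List (List (List (String × Int)))) (bag_content : List (String × Int)) (out : List Int) : Decidable (Spec_ids_of_possible_games games bag_content out) := by unfold Spec_ids_of_possible_games; infer_instance

-- ===== CLAIM (what is proved, stated in full; the proofs are below) =====
def Claim_equal_ids_of_possible_games : Prop := ∀ (games : List (List (List (String × Int)))) (bag_content : List (String × Int)), Dom_ids_of_possible_games games bag_content → Spec_ids_of_possible_games games bag_content (ids_of_possible_games games bag_content)

-- ===== LEMMAS AND PROOFS =====

-- keys stay nodup through the max-table updates
theorem pvStepMax_nodup (d : PySem.Dict String Int) (p : String × Int)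
    (h : d.keys.Nodup) : (pvStepMax d p).keys.Nodup := by
  cases hget : d.get? p.1 with
  | none => simpa only [pvStepMax, hget] using PySem.Dict.nodup_keys_insert d p.1 p.2 h
  | some m =>
      simp only [pvStepMax, hget]
      by_cases hgt : p.2 > m
      · simpa [hgt] using PySem.Dict.nodup_keys_insert d p.1 p.2 h
      · simpa [hgt] using h

theorem pvFold_nodup (l : List (String × Int)) :
    ∀ d : PySem.Dict String Int, d.keys.Nodup → (l.foldl pvStepMax d).keys.Nodup := by
  induction l with
  | nil => intro d h; exact h
  | cons p l ih => intro d h; exact ih _ (pvStepMax_nodup d p h)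

-- one max-table update preserves "all entries fit the bag" ∧ the new pair fits
theorem pvStepMax_all (bag : List (String × Int)) (d : PySem.Dict String Int)
    (p : String × Int) (h : d.keys.Nodup) :
    ((pvStepMax d p).items.all (pvOk bag)) = (d.items.all (pvOk bag) && pvOk bag p) := by
  cases hget : d.get? p.1 with
  | none =>
      have hc : d.contains p.1 = false :=
        (PySem.Dict.get?_eq_none_iff_contains d p.1).mp hget
      simp only [pvStepMax, hget]
      rw [PySem.Dict.items_insert_of_not_contains d p.2 hc]
      simp [List.all_append]
  | some m =>
      have hmem : (p.1, m) ∈ d.items := PySem.Dict.mem_items_of_get?_eq_some d hget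
      have hc : d.contains p.1 = true := by
        rw [PySem.Dict.contains_eq_isSome_get?, hget]; rfl
      simp only [pvStepMax, hget]
      by_cases hgt : p.2 > m
      · -- p.2 > m : overwrite with the larger value
        rw [if_pos hgt, PySem.Dict.items_insert_of_contains d p.2 hc, Bool.eq_iff_iff]
        simp only [List.all_eq_true, List.mem_map, Bool.and_eq_true, forall_exists_index,
          and_imp]
        constructor
        · intro hall
          have hokp : pvOk bag p = true := by
            have := hall _ (p.1, m) hmem rfl
            simpa [pvOk] using this
          refine ⟨fun q hq => ?_, hokp⟩
          by_cases hq1 : q.1 = p.1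
          · have hqm : d.get? q.1 = some q.2 := PySem.Dict.get?_of_mem_items d hq h
            rw [hq1, hget] at hqm
            have hqm2 : m = q.2 := by injection hqm
            simp only [pvOk, decide_eq_true_eq] at hokp ⊢
            rw [hq1, ← hqm2]; omega
          · exact hall q q hq (by simp [hq1])
        · rintro ⟨hall, hokp⟩ q' q hq rfl
          by_cases hq1 : q.1 = p.1
          · simpa [hq1] using hokp
          · simpa [hq1] using hall q hq
      · -- p.2 ≤ m : table unchanged, and the pair is dominated by its entry
        rw [if_neg hgt, Bool.eq_iff_iff]
        simp only [List.all_eq_true, Bool.and_eq_true]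
        constructor
        · intro hall
          refine ⟨hall, ?_⟩
          have := hall _ hmem
          simp only [pvOk, decide_eq_true_eq] at this ⊢
          omega
        · exact fun hh => hh.1

theorem pvFold_all (bag : List (String × Int)) (l : List (String × Int)) :
    ∀ d : PySem.Dict String Int, d.keys.Nodup →
      ((l.foldl pvStepMax d).items.all (pvOk bag))
        = (d.items.all (pvOk bag) && l.all (pvOk bag)) := by
  induction l with
  | nil => intro d h; simp
  | cons p l ih =>
      intro d h
      rw [List.foldl_cons, ih _ (pvStepMax_nodup d p h), pvStepMax_all bag d p h,
        List.all_cons]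
      simp only [Bool.and_assoc, Bool.and_comm, Bool.and_left_comm]

theorem pvMaxTable_all (bag : List (String × Int)) (game : List (List (String × Int))) :
    (pvMaxTable game).items.all (pvOk bag) = game.all (fun t => t.all (pvOk bag)) := by
  have key : ∀ (g : List (List (String × Int))) (d : PySem.Dict String Int), d.keys.Nodup →
      ((g.foldl (fun d tirage => tirage.foldl pvStepMax d) d).items.all (pvOk bag))
        = (d.items.all (pvOk bag) && g.all (fun t => t.all (pvOk bag))) := by
    intro g
    induction g with
    | nil => intro d h; simp
    | cons t g ih =>
        intro d h
        rw [List.foldl_cons, ih _ (pvFold_nodup t d h), pvFold_all bag t d h, List.all_cons]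
        simp only [Bool.and_assoc]
  unfold pvMaxTable
  rw [key game PySem.Dict.empty PySem.Dict.nodup_keys_empty]
  simp [PySem.Dict.empty]

-- A's flag loop over one list of pairs
theorem pvFlag_fold (bag : List (String × Int)) (l : List (String × Int)) :
    ∀ b : Bool,
      (l.foldl (fun gp2 p =>
          if p.2 > (PySem.Dict.mk bag).getD p.1 0 then false else gp2) b)
        = (b && l.all (pvOk bag)) := by
  induction l with
  | nil => intro b; simp
  | cons p l ih =>
      intro b
      rw [List.foldl_cons, ih, List.all_cons]
      by_cases hp : p.2 > (PySem.Dict.mk bag).getD p.1 0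
      · have hn : ¬ p.2 ≤ (PySem.Dict.mk bag).getD p.1 0 := by omega
        simp [hp, pvOk, hn]
      · have hle : p.2 ≤ (PySem.Dict.mk bag).getD p.1 0 := by omega
        simp only [if_neg hp, pvOk, hle, decide_true, Bool.true_and]

-- A's nested flag loop over a game equals B's table test
theorem pvFlag_eq_needed (bag : List (String × Int)) (game : List (List (String × Int))) :
    (game.foldl
        (fun gp tirage => tirage.foldl
          (fun gp2 p => if p.2 > (PySem.Dict.mk bag).getD p.1 0 then false else gp2) gp)
        true)
      = (pvMaxTable game).items.all (pvOk bag) := by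
  rw [pvMaxTable_all]
  have key : ∀ (g : List (List (String × Int))) (b : Bool),
      (g.foldl
          (fun gp tirage => tirage.foldl
            (fun gp2 p => if p.2 > (PySem.Dict.mk bag).getD p.1 0 then false else gp2) gp)
          b)
        = (b && g.all (fun t => t.all (pvOk bag))) := by
    intro g
    induction g with
    | nil => intro b; simp
    | cons t g ih =>
        intro b
        rw [List.foldl_cons, ih, pvFlag_fold, List.all_cons]
        simp only [Bool.and_assoc]
  rw [key game true]; simp

-- ===== VERDICT (by name: the statement is the Claim_ definition above) =====
theorem ids_of_possible_games_spec : Claim_equal_ids_of_possible_games := by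
  intro games bag_content _
  unfold Spec_ids_of_possible_games ids_of_possible_games ids_of_possible_games_alt
  have hfun :
      (fun (result : List Int) (ig : Int × List (List (String × Int))) =>
        let game_possible := ig.2.foldl
          (fun gp tirage => tirage.foldl
            (fun gp2 p => if p.2 > (PySem.Dict.mk bag_content).getD p.1 0 then false else gp2) gp)
          true
        if game_possible then result ++ [ig.1 + 1] else result)
      = (fun (result : List Int) (ig : Int × List (List (String × Int))) =>
        if (fun ig : Int × List (List (String × Int)) =>
              (pvMaxTable ig.2).items.all (pvOk bag_content)) ig
        then result ++ [(fun ig : Int × List (List (String × Int)) => ig.1 + 1) ig] else result) := by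
    funext result ig
    simp only [pvFlag_eq_needed bag_content ig.2]
  rw [hfun, PySem.List.foldl_append_if]
  simp
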